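-- pv_equiv track=rewrite | github.com/againeureka/astro_notebook | make_catalog/build_catalog.py | choose_primary_en
-- ===== SOURCE A (Python) =====
-- KO_MAP = {
--     # Messier(대표 예시)
--     "Andromeda Galaxy": "안드로메다 은하",
--     "Orion Nebula": "오리온 대성운",
--     "Pleiades": "플레이아데스 성단",
--     "Lagoon Nebula": "라군 성운",
--     "Ring Nebula": "링 성운",
--     "Dumbbell Nebula": "덤벨 성운",
--     "Hercules Globular Cluster": "헤라클레스 구상성단",
--     "Omega Nebula": "오메가 성운",
--     "Trifid Nebula": "트리피드 성운",
--     "Sombrero Galaxy": "솜브레로 은하",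
--     # 밝은 별(일부)
--     "Sirius": "시리우스",
--     "Canopus": "카노푸스",
--     "Arcturus": "아크투루스",
--     "Vega": "베가",
--     "Capella": "카펠라",
--     "Rigel": "리겔",
--     "Procyon": "프로키온",
--     "Achernar": "아케르나르",
--     "Betelgeuse": "베텔지우스",
--     "Altair": "알타이르",
--     "Deneb": "데네브",
--     "Polaris": "폴라리스",
--     "Rigel Kentaurus": "리겔 케타우루스",
--     "Aldebaran": "알데바란",
--     "Antares": "안타레스",
--     "Pollux": "폴룩스",
--     "Fomalhaut": "포말하우트",
--     "Mimosa": "미모사",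
--     "Regulus": "레굴루스",
--     "Bellatrix": "벨라트릭스",
--     "Elnath": "엘나스",
--     "Alnilam": "알닐람",
--     "Alnair": "알나이르",
--     "Alioth": "알리오스",
--     "Mirfak": "미르팍",
--     "Alkaid": "알카이드",
--     "Peacock": "피콕, 공작",
--     "Mirzam": "미르잠",
-- }
--
-- def choose_primary_en(common_names: list[str], fallbacks: list[str]) -> str:
--     """
--     대표 영어 이름 선택:
--     1) KO_MAP에 등록된 이름이면 최우선
--     2) 'star', 'nebula', 'cluster' 같은 일반어 포함 안 된 단어 선호
--     3) 가장 짧은(단어 수/길이) 이름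
--     4) 그래도 없으면 fallbacks 첫 유효값
--     """
--     cand = [n for n in common_names if n]
--     # 1) KO_MAP 최우선
--     for n in cand:
--         if n in KO_MAP:
--             return n
--     # 2) 일반어(덜 고유한) 패턴 점수화
--     def score(n: str) -> tuple:
--         low = n.lower()
--         generic = any(w in low for w in [" star", " nebula", " cluster", " galaxy", " variable", " a ", " b "])
--         words = len(n.split())
--         return (generic, words, len(n))  # generic=False(0)가 더 우선, 단어 수/길이 적을수록 우선
--     if cand:
--         cand.sort(key=score)
--         return cand[0]
--     # 4) fallbacks
--     for f in fallbacks: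
--         if f:
--             return f
--     return ""
-- ===== SOURCE B (Python) =====
-- # Representative-name picker: staged selection instead of sort — return a KO hit
-- # immediately; otherwise prefer the non-generic pool and take the first minimum
-- # by (word count, length); generic names are only used when no non-generic exists.
--
-- _KO_KEYS = frozenset([
--     "Andromeda Galaxy", "Orion Nebula", "Pleiades", "Lagoon Nebula",
--     "Ring Nebula", "Dumbbell Nebula", "Hercules Globular Cluster",
--     "Omega Nebula", "Trifid Nebula", "Sombrero Galaxy",
--     "Sirius", "Canopus", "Arcturus", "Vega", "Capella", "Rigel", "Procyon",
--     "Achernar", "Betelgeuse", "Altair", "Deneb", "Polaris", "Rigel Kentaurus",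
--     "Aldebaran", "Antares", "Pollux", "Fomalhaut", "Mimosa", "Regulus",
--     "Bellatrix", "Elnath", "Alnilam", "Alnair", "Alioth", "Mirfak", "Alkaid",
--     "Peacock", "Mirzam",
-- ])
--
-- _GENERIC = (" star", " nebula", " cluster", " galaxy", " variable", " a ", " b ")
--
--
-- def _generic(n: str) -> bool:
--     low = n.lower()
--     return any(w in low for w in _GENERIC)
--
--
-- def choose_primary_en(common_names: list[str], fallbacks: list[str]) -> str:
--     cand = [n for n in common_names if n]
--     hit = next((n for n in cand if n in _KO_KEYS), None)
--     if hit is not None: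
--         return hit
--     if cand:
--         # staged: non-generic names always beat generic ones, so the sorted
--         # head is the first (words, len)-minimum of the non-generic pool
--         # (or of all of cand when every candidate is generic)
--         pool = [n for n in cand if not _generic(n)] or cand
--         return min(pool, key=lambda n: (len(n.split()), len(n)))
--     return next((f for f in fallbacks if f), "")
-- ===== Notes on version B (the rewrite author's own statement) =====
-- stated objective: alternative
-- what changed: A stable-sorts the candidate list by the 3-tuple key (generic, words, len) and returns its head; B never sorts or builds the tuple key: it splits the candidates into a non-generic pool (falling back to all candidates when that pool is empty) and takes the first (words, len)-minimum of that pool in one linear scan, which equals the sorted head because every non-generic name precedes every generic one under the tuple order.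
import Mathlib
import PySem

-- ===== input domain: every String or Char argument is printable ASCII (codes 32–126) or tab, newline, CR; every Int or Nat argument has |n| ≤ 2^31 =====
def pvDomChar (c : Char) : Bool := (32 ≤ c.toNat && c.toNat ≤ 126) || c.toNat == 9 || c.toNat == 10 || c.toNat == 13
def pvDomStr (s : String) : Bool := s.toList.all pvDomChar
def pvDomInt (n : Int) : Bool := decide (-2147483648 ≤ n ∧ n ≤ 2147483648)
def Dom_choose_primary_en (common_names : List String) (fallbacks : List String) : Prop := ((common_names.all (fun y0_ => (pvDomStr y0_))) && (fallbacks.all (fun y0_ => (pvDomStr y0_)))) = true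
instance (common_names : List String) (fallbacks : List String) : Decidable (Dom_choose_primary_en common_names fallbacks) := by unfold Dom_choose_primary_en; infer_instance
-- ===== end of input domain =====

-- B replaces A's sort-by-3-tuple-and-take-head with a staged selection: the first
-- (words, len)-minimum of the non-generic pool (all candidates if that pool is empty);
-- objective: alternative (no speed claim).

-- ===== PORT A =====
-- the KO_MAP dict literal (values unused by the logic but kept faithfully)
def pvKoMap : PySem.Dict String String := PySem.Dict.ofList [
  ("Andromeda Galaxy", "안드로메다 은하"), ("Orion Nebula", "오리온 대성운"),
  ("Pleiades", "플레이아데스 성단"), ("Lagoon Nebula", "라군 성운"),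
  ("Ring Nebula", "링 성운"), ("Dumbbell Nebula", "덤벨 성운"),
  ("Hercules Globular Cluster", "헤라클레스 구상성단"), ("Omega Nebula", "오메가 성운"),
  ("Trifid Nebula", "트리피드 성운"), ("Sombrero Galaxy", "솜브레로 은하"),
  ("Sirius", "시리우스"), ("Canopus", "카노푸스"), ("Arcturus", "아크투루스"),
  ("Vega", "베가"), ("Capella", "카펠라"), ("Rigel", "리겔"), ("Procyon", "프로키온"),
  ("Achernar", "아케르나르"), ("Betelgeuse", "베텔지우스"), ("Altair", "알타이르"),
  ("Deneb", "데네브"), ("Polaris", "폴라리스"), ("Rigel Kentaurus", "리겔 케타우루스"),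
  ("Aldebaran", "알데바란"), ("Antares", "안타레스"), ("Pollux", "폴룩스"),
  ("Fomalhaut", "포말하우트"), ("Mimosa", "미모사"), ("Regulus", "레굴루스"),
  ("Bellatrix", "벨라트릭스"), ("Elnath", "엘나스"), ("Alnilam", "알닐람"),
  ("Alnair", "알나이르"), ("Alioth", "알리오스"), ("Mirfak", "미르팍"),
  ("Alkaid", "알카이드"), ("Peacock", "피콕, 공작"), ("Mirzam", "미르잠")]

def pvGenericWords : List String := [" star", " nebula", " cluster", " galaxy", " variable", " a ", " b "]

-- score(n): the Python tuple (generic : bool, words : int, len : int), compared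
-- lexicographically — modelled as the 3-element list [generic as 0/1, words, len]
-- under the List `<` (lexicographic), which on equal-length lists is Python's tuple `<`
def pvScore (n : String) : List Int :=
  let low := PySem.Str.lower n
  let generic := pvGenericWords.any (fun w => PySem.Str.isIn w low)
  [if generic then 1 else 0, ((PySem.Str.split₀ n).length : Int), PySem.Str.len n]

def choose_primary_en (common_names : List String) (fallbacks : List String) : String :=
  let cand := common_names.filter (fun n => !(n == ""))
  -- 1) KO_MAP 최우선: for n in cand: if n in KO_MAP: return n
  match cand.find? (fun n => PySem.Dict.contains pvKoMap n) with
  | some n => n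
  | none =>
    if !cand.isEmpty then
      -- cand.sort(key=score); return cand[0]
      (PySem.List.sorted cand pvScore false).headI
    else
      -- 4) fallbacks: for f in fallbacks: if f: return f ; return ""
      match fallbacks.find? (fun f => !(f == "")) with
      | some f => f
      | none => ""

-- ===== PORT B =====
-- _KO_KEYS: the frozenset of English names
def pvKoKeys : PySem.Set String := PySem.Set.ofList [
  "Andromeda Galaxy", "Orion Nebula", "Pleiades", "Lagoon Nebula",
  "Ring Nebula", "Dumbbell Nebula", "Hercules Globular Cluster",
  "Omega Nebula", "Trifid Nebula", "Sombrero Galaxy",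
  "Sirius", "Canopus", "Arcturus", "Vega", "Capella", "Rigel", "Procyon",
  "Achernar", "Betelgeuse", "Altair", "Deneb", "Polaris", "Rigel Kentaurus",
  "Aldebaran", "Antares", "Pollux", "Fomalhaut", "Mimosa", "Regulus",
  "Bellatrix", "Elnath", "Alnilam", "Alnair", "Alioth", "Mirfak", "Alkaid",
  "Peacock", "Mirzam"]

-- _GENERIC, B's own tuple of generic markers
def pvGenericB : List String := [" star", " nebula", " cluster", " galaxy", " variable", " a ", " b "]

-- _generic(n): any(w in n.lower() for w in _GENERIC)
def pvIsGeneric (n : String) : Bool :=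
  let low := PySem.Str.lower n
  pvGenericB.any (fun w => PySem.Str.isIn w low)

-- len(n.split()) as an Int, as Python's tuple holds it
def pvWords (n : String) : Int := ((PySem.Str.split₀ n).length : Int)

def choose_primary_en_alt (common_names : List String) (fallbacks : List String) : String :=
  let cand := common_names.filter (fun n => !(n == ""))
  -- hit = next((n for n in cand if n in _KO_KEYS), None); if hit is not None: return hit
  match cand.find? (fun n => PySem.Set.contains pvKoKeys n) with
  | some hit => hit
  | none =>
    match cand with
    | [] =>
      -- return next((f for f in fallbacks if f), "")
      (fallbacks.find? (fun f => !(f == ""))).getD ""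
    | _ :: _ =>
      -- pool = [n for n in cand if not _generic(n)] or cand
      let ng := cand.filter (fun n => !pvIsGeneric n)
      let pool := if ng.isEmpty then cand else ng
      -- min(pool, key=lambda n: (len(n.split()), len(n))) — pool is nonempty, so
      -- min2? is some; getD "" only discharges the impossible none case
      (PySem.List.min2? pool pvWords PySem.Str.len).getD ""

-- ===== PRECONDITION & SPEC =====
def Spec_choose_primary_en (common_names : List String) (fallbacks : List String) (out : String) : Prop := out = choose_primary_en_alt common_names fallbacks
instance (common_names : List String) (fallbacks : List String) (out : String) : Decidable (Spec_choose_primary_en common_names fallbacks out) := by unfold Spec_choose_primary_en; infer_instance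

-- ===== CLAIM (what is proved, stated in full; the proofs are below) =====
def Claim_equal_choose_primary_en : Prop := ∀ (common_names : List String) (fallbacks : List String), Dom_choose_primary_en common_names fallbacks → Spec_choose_primary_en common_names fallbacks (choose_primary_en common_names fallbacks)

-- ===== LEMMAS AND PROOFS =====

-- the KO keys, as a plain list (shared normal form of both membership structures)
def pvKoKeyList : List String := [
  "Andromeda Galaxy", "Orion Nebula", "Pleiades", "Lagoon Nebula",
  "Ring Nebula", "Dumbbell Nebula", "Hercules Globular Cluster",
  "Omega Nebula", "Trifid Nebula", "Sombrero Galaxy",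
  "Sirius", "Canopus", "Arcturus", "Vega", "Capella", "Rigel", "Procyon",
  "Achernar", "Betelgeuse", "Altair", "Deneb", "Polaris", "Rigel Kentaurus",
  "Aldebaran", "Antares", "Pollux", "Fomalhaut", "Mimosa", "Regulus",
  "Bellatrix", "Elnath", "Alnilam", "Alnair", "Alioth", "Mirfak", "Alkaid",
  "Peacock", "Mirzam"]

-- A's KO_MAP membership test and B's key-set membership test agree
set_option maxRecDepth 8192 in
lemma ko_contains_eq (n : String) :
    PySem.Dict.contains pvKoMap n = PySem.Set.contains pvKoKeys n := by
  rw [PySem.Dict.contains_eq_decide_mem_keys]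
  have h1 : pvKoMap.keys = pvKoKeyList := by decide
  have h2 : pvKoKeys = pvKoKeyList := by decide
  rw [h1, h2]
  by_cases h : n ∈ pvKoKeyList <;> simp [PySem.Set.contains, h]

-- the stable-sort's running first-minimum step under the full lex score …
def pvLexStep (b n : String) : String := if pvScore n < pvScore b then n else b

-- … and B's running first-minimum step under the (words, len) pair (min2?'s fold body)
def pvStep2 (m x : String) : String :=
  if (decide (pvWords x < pvWords m) || (!decide (pvWords m < pvWords x) && decide (PySem.Str.len x < PySem.Str.len m))) then x else m

-- lexicographic `<` on cons Int lists, split into head and tail (specific to the score shape)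
lemma lex_cc (a b : Int) (l m : List Int) :
    (a :: l : List Int) < (b :: m) ↔ (a < b ∨ (a = b ∧ l < m)) := by
  show List.Lex _ _ _ ↔ _ ∨ (_ ∧ List.Lex _ _ _)
  constructor
  · intro h
    cases h with
    | cons h => exact Or.inr ⟨rfl, h⟩
    | rel h => exact Or.inl h
  · rintro (h | ⟨rfl, h⟩)
    · exact List.Lex.rel h
    · exact List.Lex.cons h

-- lex comparison of the concrete 3-element Int scores, unfolded to components
lemma score_lt_iff (n b : String) :
    (pvScore n < pvScore b) ↔
      ((pvIsGeneric n = false ∧ pvIsGeneric b = true) ∨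
       (pvIsGeneric n = pvIsGeneric b ∧
        (decide (pvWords n < pvWords b) || (!decide (pvWords b < pvWords n) && decide (PySem.Str.len n < PySem.Str.len b))) = true)) := by
  show ([if pvIsGeneric n then 1 else 0, pvWords n, PySem.Str.len n] : List Int) < [if pvIsGeneric b then 1 else 0, pvWords b, PySem.Str.len b] ↔ _
  rw [lex_cc, lex_cc, lex_cc]
  by_cases hn : pvIsGeneric n <;> by_cases hb : pvIsGeneric b <;> simp [hn, hb] <;> omega

lemma pvStep2_cases (m x : String) : pvStep2 m x = m ∨ pvStep2 m x = x := by
  unfold pvStep2; split_ifs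
  · exact Or.inr rfl
  · exact Or.inl rfl

lemma lexStep_eq_step2 (b n : String) (h : pvIsGeneric n = pvIsGeneric b) :
    pvLexStep b n = pvStep2 b n := by
  unfold pvLexStep pvStep2
  by_cases hc : (decide (pvWords n < pvWords b) || (!decide (pvWords b < pvWords n) && decide (PySem.Str.len n < PySem.Str.len b))) = true
  · rw [if_pos ((score_lt_iff n b).2 (Or.inr ⟨h, hc⟩)), if_pos hc]
  · rw [if_neg (fun hlt => by
      rcases (score_lt_iff n b).1 hlt with ⟨h1, h2⟩ | ⟨_, h3⟩
      · rw [h1, h2] at h; exact Bool.false_ne_true h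
      · exact hc h3), if_neg hc]

lemma lexStep_keep (b n : String) (hb : pvIsGeneric b = false) (hn : pvIsGeneric n = true) :
    pvLexStep b n = b := by
  unfold pvLexStep
  rw [if_neg (fun hlt => by
    rcases (score_lt_iff n b).1 hlt with ⟨h1, _⟩ | ⟨h1, _⟩
    · rw [h1] at hn; exact Bool.false_ne_true hn
    · rw [hn, hb] at h1; exact Bool.noConfusion h1)]

lemma lexStep_take (b n : String) (hb : pvIsGeneric b = true) (hn : pvIsGeneric n = false) :
    pvLexStep b n = n := by
  unfold pvLexStep
  rw [if_pos ((score_lt_iff n b).2 (Or.inl ⟨hn, hb⟩))]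

-- min2? of a nonempty list is the running first-minimum fold over its tail
lemma min2?_acc : ∀ (t : List String) (m : String),
    PySem.List.min2? (m :: t) pvWords PySem.Str.len = some (t.foldl pvStep2 m)
  | [], m => rfl
  | x :: rest, m => by
    have h1 : PySem.List.min2? (m :: x :: rest) pvWords PySem.Str.len
        = PySem.List.min2? ((pvStep2 m x) :: rest) pvWords PySem.Str.len := by
      show List.foldl _ _ _ = List.foldl _ _ _
      simp only [List.foldl_cons]
      congr 1
      show (if (decide (pvWords x < pvWords m) || (!decide (pvWords m < pvWords x) && decide (PySem.Str.len x < PySem.Str.len m))) = true then some x else some m) = some (pvStep2 m x)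
      unfold pvStep2
      split_ifs <;> rfl
    rw [h1, min2?_acc rest (pvStep2 m x)]
    rfl

-- headI of the insertion sort is the running lex first-minimum
lemma headI_insertBy (lt : String → String → Bool) (x a : String) (t : List String) :
    (PySem.List.insertBy lt x (a :: t)).headI = if lt x a then x else a := by
  by_cases h : lt x a
  · simp [PySem.List.insertBy, h]
  · simp [PySem.List.insertBy, h]

lemma insertBy_ne_nil (lt : String → String → Bool) (x : String) (acc : List String) :
    PySem.List.insertBy lt x acc ≠ [] := by
  cases acc with
  | nil => simp [PySem.List.insertBy]
  | cons a t =>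
    by_cases h : lt x a
    · simp [PySem.List.insertBy, h]
    · simp [PySem.List.insertBy, h]

lemma headI_foldl_insertBy (lt : String → String → Bool) :
    ∀ (t acc : List String), acc ≠ [] →
      (t.foldl (fun acc x => PySem.List.insertBy lt x acc) acc).headI =
        t.foldl (fun b n => if lt n b then n else b) acc.headI := by
  intro t
  induction t with
  | nil => intro acc _; rfl
  | cons x rest ih =>
    intro acc hacc
    cases acc with
    | nil => exact absurd rfl hacc
    | cons a s =>
      have h1 := ih (PySem.List.insertBy lt x (a :: s)) (insertBy_ne_nil lt x (a :: s))
      simp only [List.foldl_cons] at *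
      rw [h1, headI_insertBy, List.headI_cons]

-- the lex first-minimum fold equals B's staged selection: a non-generic accumulator
-- stays ahead of every generic name, so the fold is the (words, len) fold over the
-- non-generic pool (seeded with the accumulator when it is non-generic), falling
-- back to the all-candidates fold when no non-generic name exists
lemma staged_min (cs : List String) :
    ∀ b : String,
      cs.foldl pvLexStep b =
        (match (if pvIsGeneric b then [] else [b]) ++ cs.filter (fun n => !pvIsGeneric n) with
         | [] => cs.foldl pvStep2 b
         | c :: t => t.foldl pvStep2 c) := by
  induction cs with
  | nil =>
    intro b
    by_cases hb : pvIsGeneric b <;> simp [hb]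
  | cons n rest ih =>
    intro b
    simp only [List.foldl_cons, List.filter_cons]
    by_cases hb : pvIsGeneric b <;> by_cases hn : pvIsGeneric n
    · -- both generic
      rw [lexStep_eq_step2 b n (by rw [hb, hn])]
      rw [ih (pvStep2 b n)]
      have hg : pvIsGeneric (pvStep2 b n) = true := by
        rcases pvStep2_cases b n with h | h <;> rw [h] <;> assumption
      simp only [hb, hn, hg]
      rfl
    · -- b generic, n not: take n
      rw [lexStep_take b n hb (by simpa using hn), ih n]
      simp only [hb, hn]
      rfl
    · -- b not generic, n generic: keep b
      rw [lexStep_keep b n (by simpa using hb) hn, ih b]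
      by_cases h2 : pvIsGeneric b <;> simp only [h2, hn]
      · exact absurd h2 hb
      · rfl
    · -- both non-generic
      rw [lexStep_eq_step2 b n (by rw [Bool.eq_false_iff.mpr hn, Bool.eq_false_iff.mpr hb])]
      rw [ih (pvStep2 b n)]
      have hg : pvIsGeneric (pvStep2 b n) = false := by
        rcases pvStep2_cases b n with h | h
        · rw [h]; simpa using hb
        · rw [h]; simpa using hn
      have hb2 : pvIsGeneric b = false := by simpa using hb
      have hn2 : pvIsGeneric n = false := by simpa using hn
      simp only [hg, hb2, hn2, Bool.not_false, if_true, Bool.false_eq_true, if_false,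
        List.cons_append, List.nil_append, List.foldl_cons]

-- ===== VERDICT (by name: the statement is the Claim_ definition above) =====
theorem choose_primary_en_spec : Claim_equal_choose_primary_en := by
  intro cn fb _
  unfold Spec_choose_primary_en choose_primary_en choose_primary_en_alt
  have hpred : (fun n => PySem.Dict.contains pvKoMap n) = (fun n => PySem.Set.contains pvKoKeys n) :=
    funext ko_contains_eq
  rw [hpred]
  cases hfind : (cn.filter (fun n => !(n == ""))).find? (fun n => PySem.Set.contains pvKoKeys n) with
  | some n => simp only [hfind]
  | none =>
    simp only [hfind]
    cases hc : cn.filter (fun n => !(n == "")) with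
    | nil =>
      simp only [List.isEmpty_nil, Bool.not_true, Bool.false_eq_true, if_false]
      cases fb.find? (fun f => !(f == "")) <;> rfl
    | cons c cs =>
      simp only [List.isEmpty_cons, Bool.not_false, if_true]
      rw [PySem.List.sorted_eq_foldl_insertBy, List.foldl_cons]
      have h0 : PySem.List.insertBy
          (fun a b => decide (pvScore a < pvScore b)) c ([] : List String) = [c] := by
        simp [PySem.List.insertBy]
      rw [h0, headI_foldl_insertBy _ cs [c] (by simp), List.headI_cons]
      have hstep : (fun (b n : String) => if decide (pvScore n < pvScore b) = true then n else b) = pvLexStep := by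
        funext b n
        simp [pvLexStep]
      rw [hstep, staged_min cs c]
      have hpool : (if pvIsGeneric c then [] else [c]) ++ cs.filter (fun n => !pvIsGeneric n)
          = (c :: cs).filter (fun n => !pvIsGeneric n) := by
        by_cases h : pvIsGeneric c <;> simp [h]
      rw [hpool]
      cases hp : (c :: cs).filter (fun n => !pvIsGeneric n) with
      | nil =>
        simp only [List.isEmpty_nil, if_true]
        rw [min2?_acc cs c]
        rfl
      | cons p t =>
        simp only [List.isEmpty_cons, Bool.false_eq_true, if_false]
        rw [min2?_acc t p]
        rfl
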